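-- pv_equiv track=rewrite | github.com/mevilc/Python | hw1.py | make_children
-- ===== SOURCE A (Python) =====
-- def make_children(node_to_add):
--     '''(str) -> list
--     Returns a list of all the children that is added to a node'''
--
--     child1, child2, child3, child4 = "", "", "", "" # Initialize children
--     seg1, seg2, seg3, seg4 = "", "", "", "" # Initialize segments
--
--     listOfChildren = [] # function returns this list
--
--     #---------------SEGMENTS----------------
--     for i in range (0, 2):
--         seg4 = seg4 + node_to_add[i]
--
--     for i in range (0, 4):
--         seg1 = seg1 + node_to_add[i]
--
--     for i in range (0, 6):
--         seg2 = seg2 + node_to_add[i]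
--
--     for i in range (0, 8):
--         seg3 = seg3 + node_to_add[i]
--     #------------------------------
--
--     # these lengths helps traverse through the node, only looking for #s
--     length1 = int(len(seg1)/2)
--     length2 = int(len(seg2)/2)
--     length3 = int(len(seg3)/2)
--
--     # add the penultimate number to newstr
--     child4 = child4 + seg4[0]
--     # changes the w/b side after flipping a pancake
--     if (seg4[1] == 'b'):
--         child4 = child4 + 'w'
--     elif (seg4[1] == 'w'):
--         child4 = child4 + 'b'
--     child4 = child4 + node_to_add[2:] # adds unchanged string to flipped
--     listOfChildren.append(child4)
--
--     for i in range(length1):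
--         # add the penultimate number to newstr
--         child1 = child1 + seg1[-2]
--         # flip the last character of newstr
--         if (seg1[-1] == 'b'):
--             child1 = child1 + 'w'
--         elif (seg1[-1] == 'w'):
--             child1 = child1 + 'b'
--         seg1 = seg1[:-2]
--     child1 = child1 + node_to_add[4:]
--     listOfChildren.append(child1)
--
--     for i in range(length2):
--         # add the penultimate number to newstr
--         child2 = child2 + seg2[-2]
--         # flip the last character of newstr
--         if (seg2[-1] == 'b'):
--             child2 = child2 + 'w'
--         elif (seg2[-1] == 'w'):
--             child2 = child2 + 'b'
--         seg2 = seg2[:-2]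
--     child2 = child2 + node_to_add[6:]
--     listOfChildren.append(child2)
--
--     for i in range(length3):
--         # add the penultimate number to newstr
--         child3 = child3 + seg3[-2]
--         # flip the last character of newstr
--         if (seg3[-1] == 'b'):
--             child3 = child3 + 'w'
--         elif (seg3[-1] == 'w'):
--             child3 = child3 + 'b'
--         seg3 = seg3[:-2]
--     listOfChildren.append(child3)
--
--     return listOfChildren
-- ===== SOURCE B (Python) =====
-- def _flip(c):
--     return 'w' if c == 'b' else ('b' if c == 'w' else '')
--
-- def make_children(node_to_add):
--     # one flipped pair per pancake; indexing raises IndexError when the stack is shorter than 8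
--     pairs = [node_to_add[2 * j] + _flip(node_to_add[2 * j + 1]) for j in range(4)]
--     children = []
--     for k in range(1, 4):
--         children.append(''.join(reversed(pairs[:k])) + node_to_add[2 * k:])
--     children.append(''.join(reversed(pairs)))  # flipping the whole stack uses all eight chars
--     return children
-- ===== Notes on version B (the rewrite author's own statement) =====
-- stated objective: simpler
-- what changed: Replaces the four copy-pasted segment-building blocks and destructive seg[:-2] loops with one precomputed list of flipped pancake pairs, each child being a reversed prefix of that list joined with the untouched tail.
import Mathlib
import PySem

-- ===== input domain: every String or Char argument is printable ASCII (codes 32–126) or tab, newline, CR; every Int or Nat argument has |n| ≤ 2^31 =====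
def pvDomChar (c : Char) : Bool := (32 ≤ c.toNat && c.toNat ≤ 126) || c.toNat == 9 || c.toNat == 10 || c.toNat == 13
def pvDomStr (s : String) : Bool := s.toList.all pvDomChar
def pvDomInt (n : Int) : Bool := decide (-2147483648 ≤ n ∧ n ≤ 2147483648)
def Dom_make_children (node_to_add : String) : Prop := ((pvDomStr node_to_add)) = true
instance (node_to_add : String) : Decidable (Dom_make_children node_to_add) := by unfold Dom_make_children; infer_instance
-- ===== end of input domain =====

-- B replaces A's four copy-pasted segment/destructive-slice blocks with one list of
-- flipped pancake pairs, each child being a reversed prefix of it plus the untouched tail (simpler).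


-- ===== PORT A =====
-- literal transliteration of A; node_to_add[i] → PySem.List.pyGetD (in range under Pre_)
def make_children (node_to_add : String) : List String :=
  let cs := node_to_add.toList
  let seg4 := (PySem.List.pyRange 0 2 1).foldl (fun s i => s ++ [PySem.List.pyGetD cs i ' ']) []
  let seg1 := (PySem.List.pyRange 0 4 1).foldl (fun s i => s ++ [PySem.List.pyGetD cs i ' ']) []
  let seg2 := (PySem.List.pyRange 0 6 1).foldl (fun s i => s ++ [PySem.List.pyGetD cs i ' ']) []
  let seg3 := (PySem.List.pyRange 0 8 1).foldl (fun s i => s ++ [PySem.List.pyGetD cs i ' ']) []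
  let length1 : Int := PySem.Int.floordiv (seg1.length : Int) 2
  let length2 : Int := PySem.Int.floordiv (seg2.length : Int) 2
  let length3 : Int := PySem.Int.floordiv (seg3.length : Int) 2
  let child4 := [PySem.List.pyGetD seg4 0 ' ']
  let child4 := if PySem.List.pyGetD seg4 1 ' ' == 'b' then child4 ++ ['w']
                else if PySem.List.pyGetD seg4 1 ' ' == 'w' then child4 ++ ['b'] else child4
  let child4 := child4 ++ PySem.List.slice cs (some 2) none
  let step := fun (p : List Char × List Char) (_ : Int) =>
      let c := p.1 ++ [PySem.List.pyGetD p.2 (-2) ' ']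
      let c := if PySem.List.pyGetD p.2 (-1) ' ' == 'b' then c ++ ['w']
               else if PySem.List.pyGetD p.2 (-1) ' ' == 'w' then c ++ ['b'] else c
      (c, PySem.List.slice p.2 none (some (-2)))
  let r1 := (PySem.List.pyRange 0 length1 1).foldl step ([], seg1)
  let child1 := r1.1 ++ PySem.List.slice cs (some 4) none
  let r2 := (PySem.List.pyRange 0 length2 1).foldl step ([], seg2)
  let child2 := r2.1 ++ PySem.List.slice cs (some 6) none
  let r3 := (PySem.List.pyRange 0 length3 1).foldl step ([], seg3)
  let child3 := r3.1
  [String.mk child4, String.mk child1, String.mk child2, String.mk child3]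

-- ===== PORT B =====
def pvFlip (c : Char) : List Char :=
  if c == 'b' then ['w'] else if c == 'w' then ['b'] else []

def make_children_alt (node_to_add : String) : List String :=
  let cs := node_to_add.toList
  let pairs := (PySem.List.pyRange 0 4 1).map
      (fun j => [PySem.List.pyGetD cs (2 * j) ' '] ++ pvFlip (PySem.List.pyGetD cs (2 * j + 1) ' '))
  let children := (PySem.List.pyRange 1 4 1).map
      (fun k => String.mk ((PySem.List.slice pairs none (some k)).reverse.flatten
                           ++ PySem.List.slice cs (some (2 * k)) none))
  children ++ [String.mk pairs.reverse.flatten]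

-- ===== PRECONDITION & SPEC =====
-- Pre_: A indexes node_to_add[0..7] while building its segments, raising IndexError on shorter input.
def Pre_make_children (node_to_add : String) : Prop := 8 ≤ node_to_add.toList.length
instance (node_to_add : String) : Decidable (Pre_make_children node_to_add) := by unfold Pre_make_children; infer_instance
def pvWitness_make_children : String := "1b2w3b4w"

def Spec_make_children (node_to_add : String) (out : List String) : Prop := out = make_children_alt node_to_add
instance (node_to_add : String) (out : List String) : Decidable (Spec_make_children node_to_add out) := by unfold Spec_make_children; infer_instance

-- ===== CLAIM (what is proved, stated in full; the proofs are below) =====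
def Claim_equal_make_children : Prop := ∀ (node_to_add : String), Dom_make_children node_to_add → Pre_make_children node_to_add → Spec_make_children node_to_add (make_children node_to_add)

-- ===== LEMMAS AND PROOFS =====

theorem pv_list8 (cs : List Char) (hlen : 8 ≤ cs.length) :
    ∃ a b c d e f g h t, cs = a::b::c::d::e::f::g::h::t := by
  match cs with
  | a::b::c::d::e::f::g::h::t => exact ⟨a,b,c,d,e,f,g,h,t,rfl⟩
  | [] | [_] | [_,_] | [_,_,_] | [_,_,_,_] | [_,_,_,_,_] | [_,_,_,_,_,_] | [_,_,_,_,_,_,_] =>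
      simp at hlen

set_option maxHeartbeats 1000000 in
theorem main_eq (a b c d e f g h : Char) (t : List Char) (s : String)
    (hs : s.toList = a::b::c::d::e::f::g::h::t) :
    make_children s = make_children_alt s := by
  have r2 : PySem.List.pyRange 0 2 1 = [0,1] := by decide
  have r4 : PySem.List.pyRange 0 4 1 = [0,1,2,3] := by decide
  have r6 : PySem.List.pyRange 0 6 1 = [0,1,2,3,4,5] := by decide
  have r8 : PySem.List.pyRange 0 8 1 = [0,1,2,3,4,5,6,7] := by decide
  have r14 : PySem.List.pyRange 1 4 1 = [1,2,3] := by decide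
  have r3 : PySem.List.pyRange 0 3 1 = [0,1,2] := by decide
  have q0 : PySem.List.pyGetD [a,b] 0 ' ' = a := by simp [PySem.List.pyGetD_ofNat']
  have q1 : PySem.List.pyGetD [a,b] 1 ' ' = b := by simp [PySem.List.pyGetD_ofNat']
  have f4 : PySem.Int.floordiv 4 2 = 2 := by decide
  have f6 : PySem.Int.floordiv 6 2 = 3 := by decide
  have f8 : PySem.Int.floordiv 8 2 = 4 := by decide
  have g0 : PySem.List.pyGetD (a::b::c::d::e::f::g::h::t) 0 ' ' = a := by simp [PySem.List.pyGetD_ofNat']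
  have g1 : PySem.List.pyGetD (a::b::c::d::e::f::g::h::t) 1 ' ' = b := by simp [PySem.List.pyGetD_ofNat']
  have g2 : PySem.List.pyGetD (a::b::c::d::e::f::g::h::t) 2 ' ' = c := by simp [PySem.List.pyGetD_ofNat']
  have g3 : PySem.List.pyGetD (a::b::c::d::e::f::g::h::t) 3 ' ' = d := by simp [PySem.List.pyGetD_ofNat']
  have g4 : PySem.List.pyGetD (a::b::c::d::e::f::g::h::t) 4 ' ' = e := by simp [PySem.List.pyGetD_ofNat']
  have g5 : PySem.List.pyGetD (a::b::c::d::e::f::g::h::t) 5 ' ' = f := by simp [PySem.List.pyGetD_ofNat']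
  have g6 : PySem.List.pyGetD (a::b::c::d::e::f::g::h::t) 6 ' ' = g := by simp [PySem.List.pyGetD_ofNat']
  have g7 : PySem.List.pyGetD (a::b::c::d::e::f::g::h::t) 7 ' ' = h := by simp [PySem.List.pyGetD_ofNat']
  have s2 : PySem.List.slice (a::b::c::d::e::f::g::h::t) (some 2) none = c::d::e::f::g::h::t := by
    simp [PySem.List.slice_from]
  have s4 : PySem.List.slice (a::b::c::d::e::f::g::h::t) (some 4) none = e::f::g::h::t := by
    simp [PySem.List.slice_from]
  have s6 : PySem.List.slice (a::b::c::d::e::f::g::h::t) (some 6) none = g::h::t := by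
    simp [PySem.List.slice_from]
  have t1 : ∀ (x0 x1 x2 x3 : List Char), PySem.List.slice [x0,x1,x2,x3] none (some 1) = [x0] := by
    intro x0 x1 x2 x3; simp [PySem.List.slice_to]
  have t2 : ∀ (x0 x1 x2 x3 : List Char), PySem.List.slice [x0,x1,x2,x3] none (some 2) = [x0,x1] := by
    intro x0 x1 x2 x3; simp [PySem.List.slice_to]
  have t3 : ∀ (x0 x1 x2 x3 : List Char), PySem.List.slice [x0,x1,x2,x3] none (some 3) = [x0,x1,x2] := by
    intro x0 x1 x2 x3; simp [PySem.List.slice_to]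
  have n2_2 : PySem.List.pyGetD [a,b] (-2) ' ' = a := by
    simp [PySem.List.pyGetD_neg_ofNat]
  have n2_1 : PySem.List.pyGetD [a,b] (-1) ' ' = b := by
    simp [PySem.List.pyGetD_neg_ofNat]
  have w2 : PySem.List.slice [a,b] none (some (-2)) = ([] : List Char) := by
    simp [PySem.List.slice_to_neg_ofNat]
  have n4_2 : PySem.List.pyGetD [a,b,c,d] (-2) ' ' = c := by
    simp [PySem.List.pyGetD_neg_ofNat]
  have n4_1 : PySem.List.pyGetD [a,b,c,d] (-1) ' ' = d := by
    simp [PySem.List.pyGetD_neg_ofNat]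
  have w4 : PySem.List.slice [a,b,c,d] none (some (-2)) = [a,b] := by
    simp [PySem.List.slice_to_neg_ofNat]
  have n6_2 : PySem.List.pyGetD [a,b,c,d,e,f] (-2) ' ' = e := by
    simp [PySem.List.pyGetD_neg_ofNat]
  have n6_1 : PySem.List.pyGetD [a,b,c,d,e,f] (-1) ' ' = f := by
    simp [PySem.List.pyGetD_neg_ofNat]
  have w6 : PySem.List.slice [a,b,c,d,e,f] none (some (-2)) = [a,b,c,d] := by
    simp [PySem.List.slice_to_neg_ofNat]
  have n8_2 : PySem.List.pyGetD [a,b,c,d,e,f,g,h] (-2) ' ' = g := by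
    simp [PySem.List.pyGetD_neg_ofNat]
  have n8_1 : PySem.List.pyGetD [a,b,c,d,e,f,g,h] (-1) ' ' = h := by
    simp [PySem.List.pyGetD_neg_ofNat]
  have w8 : PySem.List.slice [a,b,c,d,e,f,g,h] none (some (-2)) = [a,b,c,d,e,f] := by
    simp [PySem.List.slice_to_neg_ofNat]
  simp only [make_children, make_children_alt, hs, r2, r4, r6, r8, r14,
    List.foldl_cons, List.foldl_nil, List.map_cons, List.map_nil]
  norm_num [f4, f6, f8, r2, r3, r4, q0, q1, g0,g1,g2,g3,g4,g5,g6,g7, s2,s4,s6, t1,t2,t3,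
    n2_2,n2_1,w2,n4_2,n4_1,w4,n6_2,n6_1,w6,n8_2,n8_1,w8, List.foldl_cons, List.foldl_nil, pvFlip]
  split_ifs <;> simp_all

-- ===== VERDICT (by name: the statement is the Claim_ definition above) =====
theorem make_children_spec : Claim_equal_make_children := by
  intro s _ hpre
  obtain ⟨a,b,c,d,e,f,g,h,t,hs⟩ := pv_list8 s.toList hpre
  unfold Spec_make_children
  exact main_eq a b c d e f g h t s hs
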